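-- pv_equiv track=rewrite | github.com/kim-byoungkwan/CodingTest_final | 학원/0814김병관/학원_수업3_2차_2급_3.py | solution
-- ===== SOURCE A (Python) =====
-- def solution(n,m):
--
--     box = []
--
--     count = 0
--
--     for i in range(n,m+1):
--
--         if i % 2 == 0:
--
--             box.append(i)
--
--         else:
--
--             continue
--
--     for j in box:
--
--         count = count + j**2
--
--     return count
-- ===== SOURCE B (Python) =====
-- def solution(n, m):
--     # Closed form: sum of squares of even integers in [n, m] in O(1).
--     k1 = -((-n) // 2)   # smallest k with 2k >= n  (ceil(n/2))
--     k2 = m // 2         # largest k with 2k <= m   (floor(m/2))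
--     if k1 > k2:
--         return 0
--     def S(t):
--         return t * (t + 1) * (2 * t + 1) // 6
--     return 4 * (S(k2) - S(k1 - 1))
-- ===== Notes on version B (the rewrite author's own statement) =====
-- stated objective: faster
-- what changed: Replaced the two loops (collect evens into a list, then sum their squares) by a closed-form pyramidal-number formula over the even indices ceil(n/2)..floor(m/2).
import Mathlib
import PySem

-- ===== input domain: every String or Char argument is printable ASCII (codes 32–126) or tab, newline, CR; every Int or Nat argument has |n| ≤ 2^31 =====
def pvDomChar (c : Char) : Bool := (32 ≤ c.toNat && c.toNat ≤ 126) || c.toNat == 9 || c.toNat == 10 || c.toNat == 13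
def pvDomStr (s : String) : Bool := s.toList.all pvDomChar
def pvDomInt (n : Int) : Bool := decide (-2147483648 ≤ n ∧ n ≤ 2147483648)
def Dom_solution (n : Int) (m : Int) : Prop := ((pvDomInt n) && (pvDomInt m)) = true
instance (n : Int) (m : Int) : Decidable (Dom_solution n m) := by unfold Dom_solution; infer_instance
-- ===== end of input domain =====

-- B replaces A's two loops by a closed-form sum over the even indices ceil(n/2)..floor(m/2) (objective: faster).

-- ===== PORT A =====
-- box.append(i) is O(1) in Python, so the append loop is transcribed linearly:
-- cons onto a reversed accumulator, reversed once when the loop ends.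
def solution (n : Int) (m : Int) : Int :=
  let box := ((PySem.List.pyRange n (m + 1) 1).foldl
    (fun box i => if PySem.Int.mod i 2 = 0 then i :: box else box) []).reverse
  box.foldl (fun count j => count + j ^ 2) 0

-- ===== PORT B =====
-- S(t) = t*(t+1)*(2*t+1) // 6, Source B's helper S
def sqPyramid (t : Int) : Int := PySem.Int.floordiv (t * (t + 1) * (2 * t + 1)) 6

def solution_alt (n : Int) (m : Int) : Int :=
  let k1 := -(PySem.Int.floordiv (-n) 2)
  let k2 := PySem.Int.floordiv m 2
  if k1 > k2 then 0 else 4 * (sqPyramid k2 - sqPyramid (k1 - 1))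

-- ===== PRECONDITION & SPEC =====
def Spec_solution (n : Int) (m : Int) (out : Int) : Prop := out = solution_alt n m
instance (n : Int) (m : Int) (out : Int) : Decidable (Spec_solution n m out) := by unfold Spec_solution; infer_instance

-- ===== CLAIM (what is proved, stated in full; the proofs are below) =====
def Claim_equal_solution : Prop := ∀ (n : Int) (m : Int), Dom_solution n m → Spec_solution n m (solution n m)

-- ===== LEMMAS AND PROOFS =====

lemma six_dvd_pyr (t : Int) : (6 : Int) ∣ t * (t + 1) * (2 * t + 1) := by
  have h : ∀ x : ZMod 6, x * (x + 1) * (2 * x + 1) = 0 := by decide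
  apply (ZMod.intCast_zmod_eq_zero_iff_dvd (t * (t + 1) * (2 * t + 1)) 6).mp
  push_cast
  exact h _

lemma sqPyramid_mul_six (t : Int) : sqPyramid t * 6 = t * (t + 1) * (2 * t + 1) := by
  unfold sqPyramid
  rw [PySem.Int.floordiv_eq_ediv_of_pos (by norm_num : (0:Int) < 6)]
  exact Int.ediv_mul_cancel (six_dvd_pyr t)

lemma sqPyramid_step (t : Int) : sqPyramid t = sqPyramid (t - 1) + t ^ 2 := by
  nlinarith [sqPyramid_mul_six t, sqPyramid_mul_six (t - 1)]

lemma solution_succ (n m : Int) (h : n ≤ m + 1) :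
    solution n (m + 1) = solution n m + (if PySem.Int.mod (m + 1) 2 = 0 then (m + 1) ^ 2 else 0) := by
  unfold solution
  rw [PySem.List.pyRange_one_succ_right h]
  rw [List.foldl_append]
  simp only [List.foldl]
  split_ifs with hmod
  · rw [List.reverse_cons, List.foldl_append]; simp [List.foldl]
  · simp

lemma solution_empty (n m : Int) (h : m < n) : solution n m = 0 := by
  unfold solution
  rw [PySem.List.pyRange_one_eq_nil (by omega)]
  simp

lemma alt_empty (n m : Int) (h : m < n) : solution_alt n m = 0 := by
  unfold solution_alt
  simp only [PySem.Int.floordiv_eq_ediv_of_pos (by norm_num : (0:Int) < 2)]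
  rw [if_pos (by omega)]

lemma alt_succ (n m : Int) (h : n ≤ m + 1) :
    solution_alt n (m + 1) = solution_alt n m + (if PySem.Int.mod (m + 1) 2 = 0 then (m + 1) ^ 2 else 0) := by
  unfold solution_alt
  rw [PySem.Int.mod_eq_emod_of_pos (by norm_num : (0:Int) < 2)]
  simp only [PySem.Int.floordiv_eq_ediv_of_pos (by norm_num : (0:Int) < 2)]
  set k1 := -(-n / 2) with hk1
  by_cases hmod : (m + 1) % 2 = 0
  · -- m+1 even: (m+1)/2 = m/2 + 1, and k1 ≤ (m+1)/2
    have hstep : (m + 1) / 2 = m / 2 + 1 := by omega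
    have hle : k1 ≤ (m + 1) / 2 := by omega
    rw [if_pos hmod, if_neg (by omega)]
    by_cases hg : k1 > m / 2
    · rw [if_pos hg]
      have hk : (m + 1) / 2 = k1 := by omega
      have hm : m + 1 = 2 * k1 := by omega
      rw [hk, sqPyramid_step k1, hm]
      ring
    · rw [if_neg hg, hstep, sqPyramid_step (m / 2 + 1)]
      have h3 : m / 2 + 1 - 1 = m / 2 := by ring
      have hm : m + 1 = 2 * (m / 2 + 1) := by omega
      rw [h3, hm]
      ring
  · -- m+1 odd: (m+1)/2 = m/2, everything unchanged
    have hstep : (m + 1) / 2 = m / 2 := by omega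
    rw [if_neg hmod, hstep]
    ring

lemma solution_eq (n m : Int) : solution n m = solution_alt n m := by
  by_cases hnm : n - 1 ≤ m
  · induction m, hnm using Int.le_induction with
    | base =>
        rw [solution_empty n (n - 1) (by omega), alt_empty n (n - 1) (by omega)]
    | succ m hm ih =>
        rw [solution_succ n m (by omega), alt_succ n m (by omega), ih]
  · rw [solution_empty n m (by omega), alt_empty n m (by omega)]

-- ===== VERDICT (by name: the statement is the Claim_ definition above) =====
theorem solution_spec : Claim_equal_solution := by
  intro n m _
  exact solution_eq n m
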